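-- pv_equiv track=rewrite | github.com/kameokashinichi/sumi_chem2018 | 190226_generateFIleA.py | setValues
-- ===== SOURCE A (Python) =====
-- def setValues(param):
--
--     headerNum = ""
--     for i in range(len(param)):
--         if i == 0:
--             headerNum = headerNum + "%7s"
--         else:
--             headerNum = headerNum + "%6s"
--
--
--     val = """%5.0f{par}\
-- """.format(par=headerNum)
--
--     return val
-- ===== SOURCE B (Python) =====
-- def setValues(param):
--     return "%5.0f" + ("" if not param else "%7s" + "%6s" * (len(param) - 1))
-- ===== Notes on version B (the rewrite author's own statement) =====
-- stated objective: simpler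
-- what changed: Replaces the per-index loop that appends "%7s"/"%6s" one at a time (quadratic repeated concatenation) with a closed-form expression: "%5.0f" plus, for nonempty param, "%7s" followed by "%6s" repeated len(param)-1 times via string multiplication.
import Mathlib
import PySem

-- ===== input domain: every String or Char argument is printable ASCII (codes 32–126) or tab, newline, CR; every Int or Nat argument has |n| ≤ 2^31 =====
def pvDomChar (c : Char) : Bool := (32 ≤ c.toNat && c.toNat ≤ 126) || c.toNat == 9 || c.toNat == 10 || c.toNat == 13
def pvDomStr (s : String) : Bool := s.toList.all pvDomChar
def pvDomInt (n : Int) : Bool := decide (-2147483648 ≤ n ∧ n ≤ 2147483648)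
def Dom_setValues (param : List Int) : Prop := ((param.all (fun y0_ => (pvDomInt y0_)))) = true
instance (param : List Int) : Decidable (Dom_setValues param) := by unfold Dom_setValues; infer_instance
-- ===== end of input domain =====

-- B replaces A's per-index loop with a closed-form expression ("%7s" + repeated "%6s"); objective: simpler.


-- ===== PORT A =====
-- for i in range(len(param)): headerNum += "%7s" if i == 0 else "%6s"; return "%5.0f" + headerNum
def setValues (param : List Int) : String :=
  let headerNum : String :=
    (PySem.List.pyRange 0 (param.length : Int) 1).foldl
      (fun headerNum i => if i == 0 then headerNum ++ "%7s" else headerNum ++ "%6s") ""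
  "%5.0f" ++ headerNum

-- ===== PORT B =====
-- "%6s" * n  (Python string multiplication)
def strMul (s : String) : Nat → String
  | 0 => ""
  | n + 1 => strMul s n ++ s

def setValues_alt (param : List Int) : String :=
  "%5.0f" ++ (if param.isEmpty then "" else "%7s" ++ strMul "%6s" (param.length - 1))

-- ===== PRECONDITION & SPEC =====
def Spec_setValues (param : List Int) (out : String) : Prop := out = setValues_alt param
instance (param : List Int) (out : String) : Decidable (Spec_setValues param out) := by unfold Spec_setValues; infer_instance

-- ===== CLAIM (what is proved, stated in full; the proofs are below) =====
def Claim_equal_setValues : Prop := ∀ (param : List Int), Dom_setValues param → Spec_setValues param (setValues param)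

-- ===== LEMMAS AND PROOFS =====
theorem setValues_loop_closed (n : Nat) :
    (PySem.List.pyRange 0 ((n + 1 : Nat) : Int) 1).foldl
      (fun headerNum i => if i == 0 then headerNum ++ "%7s" else headerNum ++ "%6s") ""
      = "%7s" ++ strMul "%6s" n := by
  induction n with
  | zero => decide
  | succ m ih =>
      have h : ((m + 1 + 1 : Nat) : Int) = ((m + 1 : Nat) : Int) + 1 := by push_cast; ring
      rw [h, PySem.List.pyRange_one_succ_right (by positivity)]
      rw [List.foldl_append, ih]
      have hne : (((m + 1 : Nat) : Int) == 0) = false := by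
        simp only [beq_eq_false_iff_ne, ne_eq]; omega
      simp only [List.foldl, hne, Bool.false_eq_true, if_false, strMul, String.append_assoc]

-- ===== VERDICT (by name: the statement is the Claim_ definition above) =====
theorem setValues_spec : Claim_equal_setValues := by
  intro param _
  unfold Spec_setValues setValues setValues_alt
  cases param with
  | nil => decide
  | cons x xs =>
      simp only [List.isEmpty_cons, Bool.false_eq_true, if_false, List.length_cons,
        Nat.add_sub_cancel]
      rw [setValues_loop_closed xs.length]
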